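-- pv_equiv track=rewrite | github.com/vieveks/vichar_clip_paper_cursor | FEN_generator/test_expand_fen.py | collapse_fen
-- ===== SOURCE A (Python) =====
-- def collapse_fen(expanded_fen):
--     """Converts expanded FEN back to standard FEN notation."""
--     rows = expanded_fen.split('/')
--     collapsed_rows = []
--     for row in rows:
--         collapsed_row = ""
--         count = 0
--         for char in row:
--             if char == '1':
--                 count += 1
--             else:
--                 if count > 0:
--                     collapsed_row += str(count)
--                     count = 0
--                 collapsed_row += char
--         if count > 0:
--             collapsed_row += str(count)
--         collapsed_rows.append(collapsed_row)
--     return "/".join(collapsed_rows)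
-- ===== SOURCE B (Python) =====
-- def collapse_fen(expanded_fen):
--     """Converts expanded FEN back to standard FEN notation."""
--     out = []
--     i = 0
--     n = len(expanded_fen)
--     while i < n:
--         if expanded_fen[i] == '1':
--             j = i
--             while j < n and expanded_fen[j] == '1':
--                 j += 1
--             out.append(str(j - i))
--             i = j
--         else:
--             out.append(expanded_fen[i])
--             i += 1
--     return "".join(out)
-- ===== Notes on version B (the rewrite author's own statement) =====
-- stated objective: alternative
-- what changed: Replaces the split-into-rows pass plus a per-row character loop with a flushed counter accumulator by a single index-driven pass over the whole string that detects each maximal run of the expanded-square digit with an inner advance and emits its length; no row splitting, joining or counter state is kept.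
import Mathlib
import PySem

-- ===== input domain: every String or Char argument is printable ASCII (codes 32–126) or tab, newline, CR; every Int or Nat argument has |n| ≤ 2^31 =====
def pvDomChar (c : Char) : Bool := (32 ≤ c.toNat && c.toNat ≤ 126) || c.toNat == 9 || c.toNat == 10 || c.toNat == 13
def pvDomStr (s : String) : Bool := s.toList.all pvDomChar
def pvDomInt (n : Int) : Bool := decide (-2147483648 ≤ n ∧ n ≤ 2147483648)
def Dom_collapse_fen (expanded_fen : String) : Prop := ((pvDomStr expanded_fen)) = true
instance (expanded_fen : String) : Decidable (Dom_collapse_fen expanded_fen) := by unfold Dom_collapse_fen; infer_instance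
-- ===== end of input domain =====

-- B replaces A's split-on-'/' + per-row counter loop by one index-driven pass that
-- replaces each maximal run of '1's with its length (objective: alternative).

-- ===== PORT A =====
-- inner 'for char in row' loop of A: state = (collapsed_row, count); strings handled as List Char
def pvRowStepA (st : List Char × Int) (ch : Char) : List Char × Int :=
  if ch = '1' then (st.1, st.2 + 1)
  else ((if st.2 > 0 then st.1 ++ PySem.Int.toChars st.2 else st.1) ++ [ch], 0)

-- one row of A: run the loop from ("", 0), then the trailing 'if count > 0' flush
def pvCollapseRowA (row : List Char) : List Char :=
  let st := row.foldl pvRowStepA ([], 0)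
  if st.2 > 0 then st.1 ++ PySem.Int.toChars st.2 else st.1

def collapse_fen (expanded_fen : String) : String :=
  let rows := PySem.Chars.splitOn expanded_fen.toList ['/']
  let collapsed_rows := rows.map pvCollapseRowA          -- the append-accumulating 'for row in rows' loop
  String.ofList (PySem.Chars.join ['/'] collapsed_rows)      -- "/".join(...)

-- ===== PORT B =====
-- B's outer while loop: at a '1', the inner 'while' advances over the run (takeWhile/dropWhile
-- of the remaining chars) and str(j - i) = toChars (1 + run length) is emitted; else emit the char
def pvGoB : List Char → List Char
  | [] => []
  | c :: rest =>
    if c = '1' then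
      PySem.Int.toChars (1 + (rest.takeWhile (· = '1')).length) ++ pvGoB (rest.dropWhile (· = '1'))
    else
      c :: pvGoB rest
termination_by l => l.length
decreasing_by
  · simpa using Nat.lt_succ_of_le (List.length_dropWhile_le _ _)
  · simp

def collapse_fen_alt (expanded_fen : String) : String :=
  String.ofList (pvGoB expanded_fen.toList)

-- ===== PRECONDITION & SPEC =====
def Spec_collapse_fen (expanded_fen : String) (out : String) : Prop := out = collapse_fen_alt expanded_fen
instance (expanded_fen : String) (out : String) : Decidable (Spec_collapse_fen expanded_fen out) := by unfold Spec_collapse_fen; infer_instance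

-- ===== CLAIM (what is proved, stated in full; the proofs are below) =====
def Claim_equal_collapse_fen : Prop := ∀ (expanded_fen : String), Dom_collapse_fen expanded_fen → Spec_collapse_fen expanded_fen (collapse_fen expanded_fen)

-- ===== LEMMAS AND PROOFS =====

-- splitting a string on a single character, expressed structurally
def pvSplitc (c : Char) : List Char → List (List Char)
  | [] => [[]]
  | d :: rest =>
    if d = c then [] :: pvSplitc c rest
    else
      match pvSplitc c rest with
      | [] => [[d]]       -- unreachable: pvSplitc never returns []
      | p :: ps => (d :: p) :: ps

def pvConsHead (x : List Char) : List (List Char) → List (List Char)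
  | [] => [x]
  | p :: ps => (x ++ p) :: ps

theorem pvSplitc_ne_nil (c : Char) (l : List Char) : pvSplitc c l ≠ [] := by
  cases l with
  | nil => simp [pvSplitc]
  | cons d rest =>
    simp only [pvSplitc]
    split
    · simp
    · split <;> simp

theorem pvConsHead_nil_of_ne (ps : List (List Char)) (h : ps ≠ []) : pvConsHead [] ps = ps := by
  cases ps with
  | nil => exact absurd rfl h
  | cons p ps' => simp [pvConsHead]

theorem pvGo_eq (c : Char) : ∀ (fuel : Nat) (l cur : List Char) (acc : List (List Char)),
    l.length < fuel →
    PySem.Chars.splitOn.go [c] fuel l cur acc =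
      acc.reverse ++ pvConsHead cur.reverse (pvSplitc c l) := by
  intro fuel
  induction fuel with
  | zero => intro l cur acc h; omega
  | succ f ih =>
    intro l cur acc h
    cases l with
    | nil => simp [PySem.Chars.splitOn.go, pvSplitc, pvConsHead]
    | cons d rest =>
      simp only [PySem.Chars.splitOn.go, List.isPrefixOf,
        Bool.and_true, List.length_cons] at *
      by_cases hdc : c = d
      · subst hdc
        simp only [beq_self_eq_true, if_pos, List.drop_succ_cons, List.length_nil,
          List.drop_zero]
        rw [ih rest [] (cur.reverse :: acc) (by omega)]
        rcases hps : pvSplitc c rest with _ | ⟨p, ps⟩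
        · exact absurd hps (pvSplitc_ne_nil c rest)
        · simp [pvSplitc, pvConsHead, hps]
      · have hne : (c == d) = false := by simp [hdc]
        simp only [hne, Bool.false_eq_true, if_neg, not_false_iff]
        rw [ih rest (d :: cur) acc (by omega)]
        have hd : d ≠ c := fun hh => hdc hh.symm
        simp only [pvSplitc, if_neg hd]
        rcases hps : pvSplitc c rest with _ | ⟨p, ps⟩
        · exact absurd hps (pvSplitc_ne_nil c rest)
        · simp [pvConsHead]

theorem pvSplitOn_eq (c : Char) (l : List Char) :
    PySem.Chars.splitOn l [c] = pvSplitc c l := by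
  unfold PySem.Chars.splitOn
  rw [pvGo_eq c (l.length + 1) l [] [] (by omega)]
  simp [pvConsHead_nil_of_ne _ (pvSplitc_ne_nil c l)]

theorem pvIntercalate_splitc (c : Char) (l : List Char) :
    List.intercalate [c] (pvSplitc c l) = l := by
  induction l with
  | nil => simp [pvSplitc, List.intercalate]
  | cons d rest ih =>
    simp only [pvSplitc]
    by_cases hd : d = c
    · subst hd
      rw [if_pos rfl]
      rcases hps : pvSplitc d rest with _ | ⟨p, ps⟩
      · exact absurd hps (pvSplitc_ne_nil d rest)
      · rw [hps] at ih
        simp only [List.intercalate] at *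
        simp [ih]
    · rw [if_neg hd]
      rcases hps : pvSplitc c rest with _ | ⟨p, ps⟩
      · exact absurd hps (pvSplitc_ne_nil c rest)
      · rw [hps] at ih
        cases ps with
        | nil => simpa [List.intercalate] using congrArg (d :: ·) ih
        | cons q qs =>
          simp only [List.intercalate] at *
          simpa using congrArg (d :: ·) ih

theorem pvTakeWhile_append_cons (p : Char → Bool) (xs ys : List Char) (y : Char)
    (hy : p y = false) : (xs ++ y :: ys).takeWhile p = xs.takeWhile p := by
  induction xs with
  | nil => simp [List.takeWhile, hy]
  | cons a as ih =>
    simp only [List.cons_append, List.takeWhile]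
    cases p a <;> simp [ih]

theorem pvDropWhile_append_cons (p : Char → Bool) (xs ys : List Char) (y : Char)
    (hy : p y = false) : (xs ++ y :: ys).dropWhile p = xs.dropWhile p ++ y :: ys := by
  induction xs with
  | nil => simp [List.dropWhile, hy]
  | cons a as ih =>
    simp only [List.cons_append, List.dropWhile]
    cases p a <;> simp [ih]

theorem pvGoB_append (xs ys : List Char) :
    pvGoB (xs ++ '/' :: ys) = pvGoB xs ++ '/' :: pvGoB ys := by
  induction xs using pvGoB.induct with
  | case1 => simp [pvGoB]
  | case2 rest ih =>
    rw [List.cons_append, pvGoB, if_pos rfl,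
      pvTakeWhile_append_cons _ rest ys '/' (by decide),
      pvDropWhile_append_cons _ rest ys '/' (by decide), ih]
    conv_rhs => rw [pvGoB, if_pos rfl]
    simp [List.append_assoc]
  | case3 c rest hc ih =>
    rw [List.cons_append, pvGoB, if_neg hc, ih, pvGoB, if_neg hc, List.cons_append]

theorem pvGoB_intercalate (parts : List (List Char)) :
    pvGoB (List.intercalate ['/'] parts) = List.intercalate ['/'] (parts.map pvGoB) := by
  induction parts with
  | nil => simp [List.intercalate, pvGoB]
  | cons p ps ih =>
    cases ps with
    | nil => simp [List.intercalate]
    | cons q qs =>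
      have h1 : List.intercalate ['/'] (p :: q :: qs) =
          p ++ '/' :: List.intercalate ['/'] (q :: qs) := by simp [List.intercalate]
      have h2 : List.intercalate ['/'] (pvGoB p :: pvGoB q :: qs.map pvGoB) =
          pvGoB p ++ '/' :: List.intercalate ['/'] (pvGoB q :: qs.map pvGoB) := by
        simp [List.intercalate]
      rw [h1, pvGoB_append, ih]
      simp only [List.map_cons]
      rw [h2]

-- running A's inner loop over a block of '1's just bumps the counter
theorem pvFoldl_ones (ones : List Char) (t : List Char) (acc : List Char) (k : Int)
    (h : ∀ x ∈ ones, x = '1') :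
    (ones ++ t).foldl pvRowStepA (acc, k) = t.foldl pvRowStepA (acc, k + ones.length) := by
  induction ones generalizing k with
  | nil => simp
  | cons a as ih =>
    have ha : a = '1' := h a (by simp)
    simp only [List.cons_append, List.foldl_cons, pvRowStepA, if_pos ha]
    rw [ih (k + 1) (fun x hx => h x (by simp [hx]))]
    have harith : k + 1 + ((as.length : Int)) = k + (((a :: as).length : Int)) := by
      simp only [List.length_cons]
      push_cast
      ring
    rw [harith]

-- A's row loop (from count = 0) computes exactly B's run-replacement scan
theorem pvRowA_eq_goB : ∀ (r : List Char) (acc : List Char),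
    (if (r.foldl pvRowStepA (acc, 0)).2 > 0 then
        (r.foldl pvRowStepA (acc, 0)).1 ++ PySem.Int.toChars (r.foldl pvRowStepA (acc, 0)).2
      else (r.foldl pvRowStepA (acc, 0)).1) = acc ++ pvGoB r := by
  intro r
  induction r using pvGoB.induct with
  | case1 => intro acc; simp [pvGoB]
  | case2 rest ih =>
    intro acc
    have hdecomp : rest = rest.takeWhile (· = '1') ++ rest.dropWhile (· = '1') :=
      (List.takeWhile_append_dropWhile).symm
    have hones : ∀ x ∈ rest.takeWhile (· = '1'), x = '1' := by
      intro x hx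
      simpa using List.mem_takeWhile_imp hx
    have hk : ((1 : Int) + ((rest.takeWhile (· = '1')).length : Int)) > 0 := by positivity
    simp only [List.foldl_cons]
    rw [show pvRowStepA (acc, 0) '1' = (acc, 1) from by simp [pvRowStepA]]
    conv_lhs => rw [hdecomp]
    rw [pvFoldl_ones _ _ acc 1 hones]
    rcases hrest' : rest.dropWhile (· = '1') with _ | ⟨d, t⟩
    · simp only [List.foldl_nil]
      rw [if_pos hk]
      conv_rhs => rw [pvGoB, if_pos rfl, hrest']
      simp [pvGoB]
    · have hd : d ≠ '1' := by
        have h2 := List.head_dropWhile_not (fun x => decide (x = '1')) (l := rest)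
        rw [hrest'] at h2
        simpa using h2 (by simp)
      have step1 : pvRowStepA (acc, 1 + ((rest.takeWhile (· = '1')).length : Int)) d
          = ((acc ++ PySem.Int.toChars (1 + ((rest.takeWhile (· = '1')).length : Int))) ++ [d], 0) := by
        simp only [pvRowStepA, if_neg hd]
        rw [if_pos hk]
      have step2 : pvRowStepA (acc ++ PySem.Int.toChars (1 + ((rest.takeWhile (· = '1')).length : Int)), 0) d
          = ((acc ++ PySem.Int.toChars (1 + ((rest.takeWhile (· = '1')).length : Int))) ++ [d], 0) := by
        simp only [pvRowStepA, if_neg hd]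
        rw [if_neg (by omega : ¬ ((0:Int) > 0))]
      simp only [List.foldl_cons]
      rw [step1, ← step2, ← List.foldl_cons, ← hrest',
        ih (acc ++ PySem.Int.toChars (1 + ((rest.takeWhile (· = '1')).length : Int)))]
      conv_rhs => rw [pvGoB, if_pos rfl]
      simp [List.append_assoc]
  | case3 c rest hc ih =>
    intro acc
    simp only [List.foldl_cons]
    rw [show pvRowStepA (acc, 0) c = (acc ++ [c], 0) from by
      simp only [pvRowStepA, if_neg hc]
      rw [if_neg (by omega : ¬ ((0:Int) > 0))]]
    rw [ih (acc ++ [c])]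
    conv_rhs => rw [pvGoB, if_neg hc]
    simp

theorem pvCollapseRowA_eq (r : List Char) : pvCollapseRowA r = pvGoB r := by
  have := pvRowA_eq_goB r []
  simpa [pvCollapseRowA] using this

-- ===== VERDICT (by name: the statement is the Claim_ definition above) =====
theorem collapse_fen_spec : Claim_equal_collapse_fen := by
  intro s _
  unfold Spec_collapse_fen collapse_fen collapse_fen_alt
  simp only [PySem.Chars.join, pvSplitOn_eq]
  rw [show (pvSplitc '/' s.toList).map pvCollapseRowA = (pvSplitc '/' s.toList).map pvGoB from
    List.map_congr_left (fun r _ => pvCollapseRowA_eq r)]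
  rw [← pvGoB_intercalate, pvIntercalate_splitc]
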